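-- pv_equiv track=rewrite | github.com/iamashutoshdixit/test_solution | test.py | cooldown
-- ===== SOURCE A (Python) =====
-- def cooldown(arr,c):
--     counter = 0
--     res = []
--
--     for i in range(len(arr)):
--         if res==[]:
--             res.append(arr[i])
--
--         else:
--             if res[-1] == arr[i]:
--                 counter+=1
--             if res[-1]!=arr[i]:
--                 counter=0
--             if counter>=c:
--                 res.append("_")
--
--             res.append(arr[i])
--
--
--     return res
-- ===== SOURCE B (Python) =====
-- def cooldown(arr, c):
--     # runs-then-position traversal: split arr into maximal runs of equal
--     # values; within each run the position k is exactly A's counter, so a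
--     # separator precedes every element (except the global first) with k >= c.
--     res = []
--     started = False
--     i = 0
--     n = len(arr)
--     while i < n:
--         v = arr[i]
--         j = i
--         while j < n and arr[j] == v:
--             j += 1
--         for k in range(j - i):
--             if started and k >= c:
--                 res.append("_")
--             res.append(v)
--             started = True
--         i = j
--     return res
-- ===== Notes on version B (the rewrite author's own statement) =====
-- stated objective: alternative
-- what changed: A's flat indexed scan that inspects res[-1] and maintains a running repeat counter is replaced by a runs-based traversal: split arr into maximal runs of equal values, then emit each run's elements with a separator before every element (except the global first) whose position within its run is >= c.
import Mathlib
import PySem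

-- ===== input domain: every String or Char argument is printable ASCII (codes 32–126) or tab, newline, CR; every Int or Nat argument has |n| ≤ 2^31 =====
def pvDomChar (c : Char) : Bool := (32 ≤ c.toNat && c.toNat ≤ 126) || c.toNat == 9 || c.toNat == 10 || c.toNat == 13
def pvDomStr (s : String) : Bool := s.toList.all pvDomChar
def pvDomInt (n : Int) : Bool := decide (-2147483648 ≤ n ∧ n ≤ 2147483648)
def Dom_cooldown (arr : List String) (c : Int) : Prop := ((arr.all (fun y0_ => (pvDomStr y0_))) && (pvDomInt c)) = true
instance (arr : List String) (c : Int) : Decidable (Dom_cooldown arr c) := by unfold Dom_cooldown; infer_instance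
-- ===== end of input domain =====

-- B replaces A's flat indexed scan (which inspects res[-1] and a running counter)
-- by a runs-then-position traversal: split arr into maximal runs of equal values
-- and emit a separator before every element except the global first whose
-- position inside its run is ≥ c.  Objective: alternative decomposition.

-- ===== PORT A =====
-- loop body of A for one index: given state (counter, res) and the element arr[i]
def cooldownBody (c : Int) (st : Int × List String) (x : String) : Int × List String :=
  if st.2 = [] then (st.1, st.2 ++ [x])
  else
    let last := PySem.List.pyGetD st.2 (-1) ""
    let counter := if last = x then st.1 + 1 else st.1
    let counter := if ¬ (last = x) then 0 else counter
    let res := if c ≤ counter then st.2 ++ ["_"] else st.2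
    (counter, res ++ [x])

def cooldown (arr : List String) (c : Int) : List String :=
  ((PySem.List.pyRange 0 (arr.length : Int) 1).foldl
    (fun st i => cooldownBody c st (PySem.List.pyGetD arr i "")) (0, [])).2

-- ===== PORT B =====
-- inner loop body: for k in range(run_len): maybe "_" then the run value v
def emitRun (c : Int) (v : String) (st : Bool × List String) (k : Nat) : Bool × List String :=
  let res := if st.1 ∧ c ≤ (k : Int) then st.2 ++ ["_"] else st.2
  (true, res ++ [v])

-- outer while loop: peel one maximal run of equal values at a time
def cooldownRuns (c : Int) : Bool × List String → List String → List String
  | st, [] => st.2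
  | st, x :: xs =>
      let run := xs.takeWhile (fun y => y = x)
      cooldownRuns c ((List.range (run.length + 1)).foldl (emitRun c x) st)
        (xs.dropWhile (fun y => y = x))
  termination_by _ l => l.length
  decreasing_by simpa using Nat.lt_succ_of_le (List.length_dropWhile_le _ _)

def cooldown_alt (arr : List String) (c : Int) : List String :=
  cooldownRuns c (false, []) arr

-- ===== PRECONDITION & SPEC =====
def Spec_cooldown (arr : List String) (c : Int) (out : List String) : Prop := out = cooldown_alt arr c
instance (arr : List String) (c : Int) (out : List String) : Decidable (Spec_cooldown arr c out) := by unfold Spec_cooldown; infer_instance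

-- ===== CLAIM (what is proved, stated in full; the proofs are below) =====
def Claim_equal_cooldown : Prop := ∀ (arr : List String) (c : Int), Dom_cooldown arr c → Spec_cooldown arr c (cooldown arr c)

-- ===== LEMMAS AND PROOFS =====

-- reference description of the produced list, shared by both proofs
def sep (c j : Int) : List String := if c ≤ j then ["_"] else []

def specGo (c : Int) : String → Int → List String → List String
  | _, _, [] => []
  | p, k, x :: xs =>
      let k' := if p = x then k + 1 else 0
      sep c k' ++ x :: specGo c x k' xs

def specTop (c : Int) : List String → List String
  | [] => []
  | x :: xs => x :: specGo c x 0 xs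

-- output of one run of value v of length n whose positions carry counters j, j+1, …
def block (c : Int) (v : String) : Int → Nat → List String
  | _, 0 => []
  | j, n + 1 => sep c j ++ v :: block c v (j + 1) n

-- output after a run boundary (counter reset to 0)
def specStart (c : Int) : List String → List String
  | [] => []
  | y :: ys => sep c 0 ++ y :: specGo c y 0 ys

theorem foldl_body_eq (c : Int) :
    ∀ (xs : List String) (k : Int) (res : List String) (p : String),
      (xs.foldl (cooldownBody c) (k, res ++ [p])).2 = (res ++ [p]) ++ specGo c p k xs := by
  intro xs
  induction xs with
  | nil => intro k res p; simp [specGo]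
  | cons x xs ih =>
    intro k res p
    have hlast : PySem.List.pyGetD (res ++ [p]) (-1) "" = p := by simp [pysem]
    simp only [List.foldl_cons]
    by_cases hpx : p = x
    · by_cases hc : c ≤ k + 1
      · have hb : cooldownBody c (k, res ++ [p]) x = (k + 1, ((res ++ [p]) ++ ["_"]) ++ [x]) := by
          simp [cooldownBody, hpx, hc]
        rw [hb, ih]
        simp [specGo, sep, hpx, hc]
      · have hb : cooldownBody c (k, res ++ [p]) x = (k + 1, (res ++ [p]) ++ [x]) := by
          simp [cooldownBody, hpx, hc]
        rw [hb, ih]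
        simp [specGo, sep, hpx, hc]
    · by_cases hc : c ≤ 0
      · have hb : cooldownBody c (k, res ++ [p]) x = (0, ((res ++ [p]) ++ ["_"]) ++ [x]) := by
          simp [cooldownBody, hlast, hpx, hc]
        rw [hb, ih]
        simp [specGo, sep, hpx, hc]
      · have hb : cooldownBody c (k, res ++ [p]) x = (0, (res ++ [p]) ++ [x]) := by
          simp [cooldownBody, hlast, hpx, hc]
        rw [hb, ih]
        simp [specGo, sep, hpx, hc]

theorem cooldown_eq_specTop (arr : List String) (c : Int) : cooldown arr c = specTop c arr := by
  unfold cooldown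
  rw [PySem.List.foldl_pyRange_zero_pyGetD' arr "" (cooldownBody c) (0, [])]
  cases arr with
  | nil => simp [specTop]
  | cons x l =>
    have hb : cooldownBody c ((0 : Int), ([] : List String)) x = (0, [] ++ [x]) := by
      simp [cooldownBody]
    simp only [List.foldl_cons, hb]
    rw [foldl_body_eq]
    simp [specTop]

theorem block_succ (c : Int) (v : String) :
    ∀ (n : Nat) (j : Int), block c v j (n + 1) = block c v j n ++ (sep c (j + n) ++ [v]) := by
  intro n
  induction n with
  | zero => intro j; simp [block]
  | succ n ih =>
    intro j
    have h1 : block c v j (n + 1 + 1) = sep c j ++ v :: block c v (j + 1) (n + 1) := rfl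
    rw [h1, ih (j + 1)]
    have h2 : j + 1 + (n : Int) = j + ((n : Nat) + 1 : Nat) := by push_cast; ring
    simp [block, h2]

theorem foldl_emit_true (c : Int) (v : String) :
    ∀ (n : Nat) (res : List String),
      (List.range n).foldl (emitRun c v) (true, res) = (true, res ++ block c v 0 n) := by
  intro n
  induction n with
  | zero => intro res; simp [block]
  | succ n ih =>
    intro res
    rw [List.range_succ, List.foldl_append, ih, block_succ c v n 0]
    by_cases hc : c ≤ (n : Int) <;> simp [emitRun, sep, hc]

theorem foldl_emit_false (c : Int) (v : String) :
    ∀ (n : Nat) (res : List String),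
      (List.range (n + 1)).foldl (emitRun c v) (false, res) = (true, res ++ v :: block c v 1 n) := by
  intro n
  induction n with
  | zero => intro res; simp [List.range_succ, emitRun, block]
  | succ n ih =>
    intro res
    rw [List.range_succ, List.foldl_append, ih, block_succ c v n 1]
    have h2 : (1 : Int) + (n : Int) = (n : Int) + 1 := by ring
    rw [h2]
    by_cases hc : c ≤ (n : Int) + 1 <;> simp [emitRun, sep, hc]

theorem takeWhile_eq_replicate (l : List String) (x : String) :
    l.takeWhile (fun y => y = x) = List.replicate (l.takeWhile (fun y => y = x)).length x := by
  apply List.eq_replicate_length.mpr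
  intro b hb
  have := List.mem_takeWhile_imp hb
  simpa using this

theorem specGo_replicate (c : Int) :
    ∀ (m : Nat) (rest : List String) (v : String) (j : Int),
      (∀ y, rest.head? = some y → y ≠ v) →
      specGo c v j (List.replicate m v ++ rest) = block c v (j + 1) m ++ specStart c rest := by
  intro m
  induction m with
  | zero =>
    intro rest v j h
    cases rest with
    | nil => simp [specGo, specStart, block]
    | cons y ys =>
      have hne : ¬ (v = y) := fun e => (h y rfl) e.symm
      simp [specGo, specStart, block, hne]
  | succ m ih =>
    intro rest v j h
    have h1 : List.replicate (m + 1) v ++ rest = v :: (List.replicate m v ++ rest) := by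
      simp [List.replicate_succ]
    rw [h1]
    show sep c (if v = v then j + 1 else 0) ++ v :: specGo c v (if v = v then j + 1 else 0) (List.replicate m v ++ rest) = _
    rw [if_pos rfl, ih rest v (j + 1) h]
    simp [block]

theorem head_dropWhile_ne (l : List String) (x : String) :
    ∀ y, (l.dropWhile (fun y => y = x)).head? = some y → y ≠ x := by
  intro y hy
  have := List.head?_dropWhile_not (fun y => decide (y = x)) l
  rw [hy] at this
  simpa using this

theorem runs_true (c : Int) :
    ∀ (n : Nat) (xs : List String), xs.length ≤ n → ∀ res,
      cooldownRuns c (true, res) xs = res ++ specStart c xs := by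
  intro n
  induction n with
  | zero =>
    intro xs h res
    have hx : xs = [] := by cases xs <;> simp_all
    subst hx
    simp [cooldownRuns, specStart]
  | succ n ih =>
    intro xs h res
    cases xs with
    | nil => simp [cooldownRuns, specStart]
    | cons x l =>
      rw [cooldownRuns]
      rw [foldl_emit_true]
      rw [ih (l.dropWhile (fun y => y = x))
        (le_trans (List.length_dropWhile_le _ _) (Nat.succ_le_succ_iff.mp h))]
      have hsplit : l = l.takeWhile (fun y => y = x) ++ l.dropWhile (fun y => y = x) :=
        (List.takeWhile_append_dropWhile).symm
      have hspec : specStart c (x :: l)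
          = sep c 0 ++ x :: (block c x 1 (l.takeWhile (fun y => y = x)).length
              ++ specStart c (l.dropWhile (fun y => y = x))) := by
        show sep c 0 ++ x :: specGo c x 0 l = _
        conv_lhs => rw [hsplit, takeWhile_eq_replicate]
        rw [specGo_replicate c _ _ x 0 (head_dropWhile_ne l x)]
        norm_num
      rw [hspec]
      have hblk : block c x 0 ((l.takeWhile (fun y => y = x)).length + 1)
          = sep c 0 ++ x :: block c x 1 (l.takeWhile (fun y => y = x)).length := rfl
      simp [hblk]

theorem alt_eq_specTop (arr : List String) (c : Int) : cooldown_alt arr c = specTop c arr := by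
  cases arr with
  | nil => simp [cooldown_alt, cooldownRuns, specTop]
  | cons x l =>
    show cooldownRuns c (false, []) (x :: l) = _
    rw [cooldownRuns, foldl_emit_false]
    rw [runs_true c (l.dropWhile (fun y => y = x)).length _ (le_refl _)]
    have hsplit : l = l.takeWhile (fun y => y = x) ++ l.dropWhile (fun y => y = x) :=
      (List.takeWhile_append_dropWhile).symm
    show [] ++ x :: block c x 1 (l.takeWhile (fun y => y = x)).length
        ++ specStart c (l.dropWhile (fun y => y = x)) = x :: specGo c x 0 l
    conv_rhs => rw [hsplit, takeWhile_eq_replicate]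
    rw [specGo_replicate c _ _ x 0 (head_dropWhile_ne l x)]
    norm_num

-- ===== VERDICT (by name: the statement is the Claim_ definition above) =====
theorem cooldown_spec : Claim_equal_cooldown := by
  intro arr c _
  unfold Spec_cooldown
  rw [cooldown_eq_specTop, alt_eq_specTop]
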